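-- pv_equiv track=rewrite | github.com/Shubham-SK/asoka | app/orchestrator/plan_backend.py | _resolve_lookup_field_name
-- ===== SOURCE A (Python) =====
-- def _resolve_lookup_field_name(
--     object_name: str,
--     requested_field: str,
--     available_fields: set[str],
-- ) -> str:
--     if not available_fields:
--         return requested_field
--     if requested_field in available_fields:
--         return requested_field
--     if requested_field.lower() == "name":
--         for fallback in ("Name", "Subject", "CaseNumber"):
--             if fallback in available_fields:
--                 return fallback
--     if object_name.lower() == "case":
--         for fallback in ("Subject", "CaseNumber"):
--             if fallback in available_fields:
--                 return fallback
--     return requested_field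
-- ===== SOURCE B (Python) =====
-- def _resolve_lookup_field_name(
--     object_name: str,
--     requested_field: str,
--     available_fields: set[str],
-- ) -> str:
--     # Inverted traversal: instead of scanning candidates and testing membership
--     # in the set, scan the available fields once and keep the one with the
--     # lowest priority rank (index in the candidate order).
--     order = [requested_field]
--     if requested_field.lower() == "name":
--         order += ["Name", "Subject", "CaseNumber"]
--     if object_name.lower() == "case":
--         order += ["Subject", "CaseNumber"]
--     best = None
--     for f in available_fields:
--         try:
--             r = order.index(f)
--         except ValueError:
--             continue
--         if best is None or r < best[0]:
--             best = (r, f)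
--     return best[1] if best is not None else requested_field
-- ===== Notes on version B (the rewrite author's own statement) =====
-- stated objective: alternative
-- what changed: Inverts the traversal: instead of scanning a fixed candidate chain and testing set membership, B builds a rank (priority index) for each candidate and makes a single pass over available_fields keeping the field with the minimal rank.
import Mathlib
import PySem

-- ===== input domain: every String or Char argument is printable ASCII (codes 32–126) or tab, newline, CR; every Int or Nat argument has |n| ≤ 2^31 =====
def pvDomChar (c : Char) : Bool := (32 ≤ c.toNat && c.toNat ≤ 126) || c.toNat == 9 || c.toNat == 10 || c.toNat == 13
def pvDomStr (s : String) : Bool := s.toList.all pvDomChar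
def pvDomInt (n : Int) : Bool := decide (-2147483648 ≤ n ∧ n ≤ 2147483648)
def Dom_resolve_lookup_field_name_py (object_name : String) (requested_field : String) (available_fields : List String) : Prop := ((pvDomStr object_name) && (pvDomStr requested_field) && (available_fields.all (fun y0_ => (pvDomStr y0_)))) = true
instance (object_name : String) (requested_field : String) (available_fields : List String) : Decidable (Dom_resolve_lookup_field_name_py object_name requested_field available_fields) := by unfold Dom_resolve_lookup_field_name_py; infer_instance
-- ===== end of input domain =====

-- B inverts the traversal (one pass over available_fields minimising a candidate rank) instead of A's candidate-chain membership tests; same result.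
-- ===== PORT A =====
-- transliteration of A: early returns as nested ifs; each fallback for-loop becomes find? over its literal tuple
def resolve_lookup_field_name_py (object_name : String) (requested_field : String) (available_fields : List String) : String :=
  if available_fields = [] then requested_field
  else if available_fields.contains requested_field then requested_field
  else
    match (if PySem.Str.lower requested_field = "name"
           then (["Name", "Subject", "CaseNumber"] : List String).find? (fun fallback => available_fields.contains fallback)
           else none) with
    | some fallback => fallback
    | none =>
      match (if PySem.Str.lower object_name = "case"
             then (["Subject", "CaseNumber"] : List String).find? (fun fallback => available_fields.contains fallback)
             else none) with
      | some fallback => fallback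
      | none => requested_field

-- ===== PORT B =====
-- one loop step of Source B: look up f's rank in the candidate order, keep the lower-ranked of best and f
def pvStep (order : List String) (best : Option (Nat × String)) (f : String) : Option (Nat × String) :=
  match PySem.List.index? order f with
  | none => best
  | some r =>
    match best with
    | none => some (r, f)
    | some (br, bf) => if r < br then some (r, f) else some (br, bf)

-- transliteration of B: build the candidate order, then one pass over available_fields keeping the minimal-rank field
def resolve_lookup_field_name_py_alt (object_name : String) (requested_field : String) (available_fields : List String) : String :=
  let order : List String :=
    [requested_field]
      ++ (if PySem.Str.lower requested_field = "name" then ["Name", "Subject", "CaseNumber"] else [])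
      ++ (if PySem.Str.lower object_name = "case" then ["Subject", "CaseNumber"] else [])
  match available_fields.foldl (pvStep order) none with
  | some (_, f) => f
  | none => requested_field

-- ===== PRECONDITION & SPEC =====
def Spec_resolve_lookup_field_name_py (object_name : String) (requested_field : String) (available_fields : List String) (out : String) : Prop := out = resolve_lookup_field_name_py_alt object_name requested_field available_fields
instance (object_name : String) (requested_field : String) (available_fields : List String) (out : String) : Decidable (Spec_resolve_lookup_field_name_py object_name requested_field available_fields out) := by unfold Spec_resolve_lookup_field_name_py; infer_instance

-- ===== CLAIM (what is proved, stated in full; the proofs are below) =====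
def Claim_equal_resolve_lookup_field_name_py : Prop := ∀ (object_name : String) (requested_field : String) (available_fields : List String), Dom_resolve_lookup_field_name_py object_name requested_field available_fields → Spec_resolve_lookup_field_name_py object_name requested_field available_fields (resolve_lookup_field_name_py object_name requested_field available_fields)

-- ===== LEMMAS AND PROOFS =====

-- left-biased min-by-first-component merge; pvStep b f = pvMerge b (rank of f)
def pvMerge : Option (Nat × String) → Option (Nat × String) → Option (Nat × String)
  | none, y => y
  | some p, none => some p
  | some p, some q => if q.1 < p.1 then some q else some p

theorem pvStep_eq_merge (order : List String) (b : Option (Nat × String)) (f : String) :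
    pvStep order b f = pvMerge b ((PySem.List.index? order f).map (fun r => (r, f))) := by
  unfold pvStep pvMerge
  cases PySem.List.index? order f with
  | none => cases b <;> rfl
  | some r => cases b with
    | none => rfl
    | some p => simp

theorem pvMerge_assoc (a b c : Option (Nat × String)) :
    pvMerge (pvMerge a b) c = pvMerge a (pvMerge b c) := by
  rcases a with _ | ⟨a1, a2⟩ <;> rcases b with _ | ⟨b1, b2⟩ <;> rcases c with _ | ⟨c1, c2⟩ <;>
    try rfl
  all_goals (simp only [pvMerge] <;> split_ifs <;> simp only [pvMerge] <;> (try split_ifs) <;> first | rfl | omega)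

theorem pvMerge_eq_none {a b : Option (Nat × String)} (h : pvMerge a b = none) :
    a = none ∧ b = none := by
  rcases a with _ | a <;> rcases b with _ | b <;> simp_all [pvMerge]
  split at h <;> simp_all

theorem foldl_step_merge (order : List String) (af : List String) (b : Option (Nat × String)) :
    af.foldl (pvStep order) b = pvMerge b (af.foldl (pvStep order) none) := by
  induction af generalizing b with
  | nil => cases b <;> rfl
  | cons f t ih =>
    simp only [List.foldl_cons]
    rw [ih (pvStep order b f), ih (pvStep order none f),
        pvStep_eq_merge, pvStep_eq_merge, pvMerge_assoc]
    rfl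

-- characterisation of the fold: none ⇒ no available field is a candidate
theorem fold_none_char (order af : List String)
    (h : af.foldl (pvStep order) none = none) :
    ∀ g ∈ af, PySem.List.index? order g = none := by
  induction af with
  | nil => intro g hg; cases hg
  | cons f t ih =>
    rw [List.foldl_cons, foldl_step_merge] at h
    obtain ⟨h1, h2⟩ := pvMerge_eq_none h
    intro g hg
    rcases List.mem_cons.mp hg with rfl | hg
    · rw [pvStep_eq_merge] at h1
      cases hf : PySem.List.index? order g with
      | none => rfl
      | some r => rw [hf] at h1; simp [pvMerge] at h1
    · exact ih h2 g hg

-- characterisation of the fold: some (r, f) ⇒ f is available with rank r, and r is minimal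
theorem fold_some_char (order af : List String) (r : Nat) (f : String)
    (h : af.foldl (pvStep order) none = some (r, f)) :
    PySem.List.index? order f = some r ∧ f ∈ af ∧
      ∀ g ∈ af, ∀ s, PySem.List.index? order g = some s → r ≤ s := by
  induction af generalizing r f with
  | nil => cases h
  | cons a t ih =>
    rw [List.foldl_cons, foldl_step_merge, pvStep_eq_merge] at h
    have hnm : pvMerge none ((PySem.List.index? order a).map (fun r => (r, a))) =
        (PySem.List.index? order a).map (fun r => (r, a)) := rfl
    rw [hnm] at h
    cases ha : PySem.List.index? order a with
    | none =>
      rw [ha] at h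
      simp only [Option.map_none] at h
      have ht : t.foldl (pvStep order) none = some (r, f) := h
      obtain ⟨hidx, hmem, hmin⟩ := ih r f ht
      refine ⟨hidx, List.mem_cons_of_mem _ hmem, ?_⟩
      intro g hg s hs
      rcases List.mem_cons.mp hg with rfl | hg
      · rw [ha] at hs; cases hs
      · exact hmin g hg s hs
    | some ra =>
      rw [ha] at h
      simp only [Option.map_some] at h
      cases ht : t.foldl (pvStep order) none with
      | none =>
        rw [ht] at h
        simp only [pvMerge] at h
        injection h with h'
        obtain ⟨rfl, rfl⟩ := Prod.mk.inj h'
        refine ⟨ha, List.mem_cons_self, ?_⟩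
        intro g hg s hs
        rcases List.mem_cons.mp hg with rfl | hg
        · rw [ha] at hs; injection hs with hs; omega
        · rw [fold_none_char order t ht g hg] at hs; cases hs
      | some q =>
        obtain ⟨q1, q2⟩ := q
        rw [ht] at h
        simp only [pvMerge] at h
        obtain ⟨hidx, hmem, hmin⟩ := ih q1 q2 ht
        by_cases hlt : q1 < ra
        · rw [if_pos hlt] at h
          injection h with h'
          obtain ⟨rfl, rfl⟩ := Prod.mk.inj h'
          refine ⟨hidx, List.mem_cons_of_mem _ hmem, ?_⟩
          intro g hg s hs
          rcases List.mem_cons.mp hg with rfl | hg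
          · rw [ha] at hs; injection hs with hs; omega
          · exact hmin g hg s hs
        · rw [if_neg hlt] at h
          injection h with h'
          obtain ⟨rfl, rfl⟩ := Prod.mk.inj h'
          refine ⟨ha, List.mem_cons_self, ?_⟩
          intro g hg s hs
          rcases List.mem_cons.mp hg with rfl | hg
          · rw [ha] at hs; injection hs with hs; omega
          · have := hmin g hg s hs; omega

-- the minimal-rank available field is exactly the first candidate occurring in af
theorem main_lemma (order af : List String) (rf : String) :
    (match af.foldl (pvStep order) none with
     | some (_, f) => f
     | none => rf)
    = (match order.find? (fun c => af.contains c) with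
       | some c => c
       | none => rf) := by
  cases hb : af.foldl (pvStep order) none with
  | none =>
    have hn := fold_none_char order af hb
    cases hf : order.find? (fun c => af.contains c) with
    | none => rfl
    | some c =>
      have hc := List.find?_some hf
      have hcm : c ∈ order := List.mem_of_find?_eq_some hf
      simp only [List.contains_eq_mem, decide_eq_true_eq] at hc
      have : PySem.List.index? order c = none := hn c hc
      rw [PySem.List.index?_eq_none_iff] at this
      exact absurd hcm this
  | some p =>
    obtain ⟨r, f⟩ := p
    obtain ⟨hidx, hmem, hmin⟩ := fold_some_char order af r f hb
    obtain ⟨hr, hgr, hfirst⟩ := PySem.List.getElem_of_index?_eq_some hidx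
    cases hf : order.find? (fun c => af.contains c) with
    | none =>
      have hmemo : f ∈ order := by rw [← hgr]; exact List.getElem_mem hr
      have hx := List.find?_eq_none.mp hf f hmemo
      simp [List.contains_eq_mem, hmem] at hx
    | some c =>
      have hc : c ∈ af := by
        have := List.find?_some hf
        simpa [List.contains_eq_mem] using this
      have hcm : c ∈ order := List.mem_of_find?_eq_some hf
      obtain ⟨s, hs⟩ : ∃ s, PySem.List.index? order c = some s := by
        cases hi : PySem.List.index? order c with
        | none => rw [PySem.List.index?_eq_none_iff] at hi; exact absurd hcm hi
        | some s => exact ⟨s, rfl⟩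
      have hrs : r ≤ s := hmin c hc s hs
      obtain ⟨hs', hgs, hfirst'⟩ := PySem.List.getElem_of_index?_eq_some hs
      obtain ⟨-, j, hj, hgj, hjfirst⟩ := List.find?_eq_some_iff_getElem.mp hf
      have hjr : j ≤ r := by
        by_contra hcon
        push_neg at hcon
        have hy := hjfirst r hcon
        simp at hy
        exact hy (by rw [hgr]; exact hmem)
      have hsj : ¬ j < s := by
        intro hlt
        exact hfirst' j hlt hgj
      have hjs : j = s := by omega
      have hrr : r = s := by omega
      show f = c
      rw [← hgr, ← hgj]
      congr 1
      omega

-- B's body written in find?-form (main_lemma applied to B's candidate order)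
theorem alt_eq (object_name requested_field : String) (af : List String) :
    resolve_lookup_field_name_py_alt object_name requested_field af =
      (match (([requested_field]
          ++ (if PySem.Str.lower requested_field = "name" then ["Name", "Subject", "CaseNumber"] else [])
          ++ (if PySem.Str.lower object_name = "case" then ["Subject", "CaseNumber"] else [])).find?
            (fun c => af.contains c)) with
       | some c => c
       | none => requested_field) := by
  unfold resolve_lookup_field_name_py_alt
  exact main_lemma _ af requested_field

-- ===== VERDICT (by name: the statement is the Claim_ definition above) =====
theorem resolve_lookup_field_name_py_spec : Claim_equal_resolve_lookup_field_name_py := by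
  intro o rf af _
  show resolve_lookup_field_name_py o rf af = resolve_lookup_field_name_py_alt o rf af
  rw [alt_eq]
  unfold resolve_lookup_field_name_py
  by_cases he : af = []
  · subst he
    by_cases h1 : PySem.Str.lower rf = "name" <;>
    by_cases h2 : PySem.Str.lower o = "case" <;>
    simp [h1, h2, List.find?]
  · by_cases hrf : rf ∈ af
    · simp [he, hrf]
    · by_cases h1 : PySem.Str.lower rf = "name" <;>
      by_cases h2 : PySem.Str.lower o = "case" <;>
      by_cases hn : ("Name" : String) ∈ af <;>
      by_cases hs : ("Subject" : String) ∈ af <;>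
      by_cases hc : ("CaseNumber" : String) ∈ af <;>
      simp [he, hrf, h1, h2, hn, hs, hc, List.find?]
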